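-- pv_equiv track=rewrite | github.com/shymonski-dev/contextprime | doctags_rag/src/knowledge_graph/entity_resolver.py | find_canonical_form
-- ===== SOURCE A (Python) =====
-- from typing import Dict, List, Any, Optional, Tuple, Set
--
-- def find_canonical_form(
--
--     entity_variants: List[str]
-- ) -> str:
--     """
--     Find the canonical form for entity variants.
--
--     Args:
--         entity_variants: List of entity text variants
--
--     Returns:
--         Canonical form (most common or longest form)
--     """
--     if not entity_variants:
--         return ""
--
--     if len(entity_variants) == 1:
--         return entity_variants[0]
--
--     # Count occurrences
--     from collections import Counter
--     counts = Counter(entity_variants)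
--
--     # Get most common
--     most_common = counts.most_common(1)[0][0]
--
--     # If there's a tie, prefer the longest form
--     max_count = counts[most_common]
--     candidates = [text for text, count in counts.items() if count == max_count]
--
--     if len(candidates) > 1:
--         canonical = max(candidates, key=len)
--     else:
--         canonical = most_common
--
--     return canonical
-- ===== SOURCE B (Python) =====
-- def find_canonical_form(entity_variants):
--     if not entity_variants:
--         return ""
--     # running maximum over the raw list: no Counter, no candidate list --
--     # each element's frequency is recomputed with list.count, and a strict
--     # (count, length) improvement test keeps the earliest winner on ties.
--     canonical = entity_variants[0]
--     best_count = entity_variants.count(canonical)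
--     for text in entity_variants:
--         count = entity_variants.count(text)
--         if count > best_count or (count == best_count and len(text) > len(canonical)):
--             canonical = text
--             best_count = count
--     return canonical
-- ===== Notes on version B (the rewrite author's own statement) =====
-- stated objective: alternative
-- what changed: A's Counter-based staged selection (most_common(1), re-read max count, build a candidate list, branch, max by len) is replaced by a single running-maximum scan over the raw list that recomputes each element's frequency with list.count and updates on a strict (count, then length) improvement, so ties keep the earliest variant; no Counter, no intermediate lists.
import Mathlib
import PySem

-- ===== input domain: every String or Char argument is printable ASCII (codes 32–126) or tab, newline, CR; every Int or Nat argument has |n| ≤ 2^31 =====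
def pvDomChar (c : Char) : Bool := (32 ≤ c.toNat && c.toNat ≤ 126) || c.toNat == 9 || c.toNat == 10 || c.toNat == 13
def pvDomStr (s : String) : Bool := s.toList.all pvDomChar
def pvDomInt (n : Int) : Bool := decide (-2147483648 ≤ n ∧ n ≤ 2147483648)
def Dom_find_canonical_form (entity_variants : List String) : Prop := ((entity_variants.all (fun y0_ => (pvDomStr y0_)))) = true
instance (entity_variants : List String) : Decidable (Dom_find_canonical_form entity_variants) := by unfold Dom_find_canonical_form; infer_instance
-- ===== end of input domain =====

-- B drops the Counter and candidate phases for a single running-maximum scan of the raw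
-- list (frequency recomputed by list.count, strict (count, length) improvement test):
-- an alternative decomposition, same result, not claimed faster.

-- ===== PORT A =====
def find_canonical_form (entity_variants : List String) : String :=
  if entity_variants = [] then ""
  else if PySem.List.len entity_variants = 1 then
    -- entity_variants[0]; the list is nonempty here, so the IndexError default never fires
    (PySem.List.pyGet? entity_variants 0).getD ""
  else
    -- counts = Counter(entity_variants)
    -- most_common = counts.most_common(1)[0][0]: heapq.nlargest(1, items, key=count) is the
    -- FIRST item with maximal count = PySem.List.max?; nonempty here, so .getD never fires
    -- max_count = counts[most_common]; candidates = [text for text, count in counts.items() if count == max_count]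
    if 1 < (((PySem.Dict.counter entity_variants).items.filter
              (fun p => p.2 == (PySem.Dict.counter entity_variants).getD
                (((PySem.List.max? (PySem.Dict.counter entity_variants).items (fun p => p.2)).map Prod.fst).getD "") 0)).map Prod.fst).length then
      (PySem.List.max? (((PySem.Dict.counter entity_variants).items.filter
              (fun p => p.2 == (PySem.Dict.counter entity_variants).getD
                (((PySem.List.max? (PySem.Dict.counter entity_variants).items (fun p => p.2)).map Prod.fst).getD "") 0)).map Prod.fst)
        (fun t => PySem.Str.len t)).getD ""
    else ((PySem.List.max? (PySem.Dict.counter entity_variants).items (fun p => p.2)).map Prod.fst).getD ""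

-- ===== PORT B =====
def find_canonical_form_alt (entity_variants : List String) : String :=
  if entity_variants = [] then ""
  else
    -- canonical = entity_variants[0]; best_count = entity_variants.count(canonical);
    -- then one for-loop over the raw list, updating (canonical, best_count) on a strict
    -- (count, then length) improvement
    (entity_variants.foldl
      (fun (b : String × Int) x =>
        if (PySem.List.count entity_variants x : Int) > b.2 ∨
           ((PySem.List.count entity_variants x : Int) = b.2 ∧ PySem.Str.len x > PySem.Str.len b.1)
        then (x, (PySem.List.count entity_variants x : Int)) else b)
      ((PySem.List.pyGet? entity_variants 0).getD "",
       (PySem.List.count entity_variants ((PySem.List.pyGet? entity_variants 0).getD "") : Int))).1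

-- ===== PRECONDITION & SPEC =====
def Spec_find_canonical_form (entity_variants : List String) (out : String) : Prop := out = find_canonical_form_alt entity_variants
instance (entity_variants : List String) (out : String) : Decidable (Spec_find_canonical_form entity_variants out) := by unfold Spec_find_canonical_form; infer_instance

-- ===== CLAIM (what is proved, stated in full; the proofs are below) =====
def Claim_equal_find_canonical_form : Prop := ∀ (entity_variants : List String), Dom_find_canonical_form entity_variants → Spec_find_canonical_form entity_variants (find_canonical_form entity_variants)

-- ===== LEMMAS AND PROOFS =====

-- one foldl step of max? over a snoc
theorem max?_append_singleton {α κ : Type} [LT κ] [DecidableLT κ]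
    (xs : List α) (key : α → κ) (x : α) :
    PySem.List.max? (xs ++ [x]) key =
      match PySem.List.max? xs key with
      | none => some x
      | some m => if key m < key x then some x else some m := by
  simp only [PySem.List.max?, List.foldl_append, List.foldl_cons, List.foldl_nil]
  rfl

-- one foldl step of max2? over a snoc
theorem max2?_append_singleton {α κ₁ κ₂ : Type} [LT κ₁] [DecidableLT κ₁] [LT κ₂] [DecidableLT κ₂]
    (xs : List α) (k1 : α → κ₁) (k2 : α → κ₂) (x : α) :
    PySem.List.max2? (xs ++ [x]) k1 k2 =
      match PySem.List.max2? xs k1 k2 with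
      | none => some x
      | some m => if (decide (k1 m < k1 x) || !decide (k1 x < k1 m) && decide (k2 m < k2 x)) = true
                  then some x else some m := by
  simp only [PySem.List.max2?, List.foldl_append, List.foldl_cons, List.foldl_nil]
  rfl

-- max? over a mapped list is max? with the composed key, mapped back
theorem max?_map {α β κ : Type} [LT κ] [DecidableLT κ]
    (xs : List α) (f : α → β) (key : β → κ) :
    PySem.List.max? (xs.map f) key = (PySem.List.max? xs (fun a => key (f a))).map f := by
  induction xs using List.reverseRecOn with
  | nil => rfl
  | append_singleton t x ih =>
      rw [List.map_append, List.map_singleton, max?_append_singleton, max?_append_singleton, ih]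
      cases PySem.List.max? t (fun a => key (f a)) with
      | none => rfl
      | some m => by_cases h : key (f m) < key (f x) <;> simp [h]

-- A-SIDE CORE: the first (count,len)-lexicographic maximum equals the first len-maximum
-- among the elements attaining the maximal count (A's candidate list).
theorem max2?_eq_max?_filter (c ℓ : String → Int) :
    ∀ (S : List String) (m : String), PySem.List.max? S c = some m →
      PySem.List.max2? S c ℓ = PySem.List.max? (S.filter (fun t => c t == c m)) ℓ := by
  intro S
  induction S using List.reverseRecOn with
  | nil => intro m hm; simp [PySem.List.max?] at hm
  | append_singleton T x ih =>
      intro m hm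
      rw [max?_append_singleton] at hm
      rw [max2?_append_singleton, List.filter_append]
      cases hT : PySem.List.max? T c with
      | none =>
          have hTnil : T = [] := (PySem.List.max?_eq_none_iff T c).mp hT
          subst hTnil
          simp only [hT] at hm
          rw [Option.some.injEq] at hm
          subst hm
          simp [PySem.List.max?, PySem.List.max2?]
      | some m' =>
          rw [hT] at hm
          simp only at hm
          have hm'mem : m' ∈ T := PySem.List.max?_mem hT
          have hmax' : ∀ y ∈ T, c y ≤ c m' := PySem.List.max?_isMax hT
          have hfilt : PySem.List.max2? T c ℓ
              = PySem.List.max? (T.filter (fun t => c t == c m')) ℓ := ih m' hT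
          obtain ⟨r, hr⟩ : ∃ r, PySem.List.max2? T c ℓ = some r := by
            rcases h : PySem.List.max2? T c ℓ with _ | r
            · rw [hfilt] at h
              have := (PySem.List.max?_eq_none_iff _ ℓ).mp h
              rw [List.filter_eq_nil_iff] at this
              exact absurd (by simp) (this m' hm'mem)
            · exact ⟨r, rfl⟩
          have hfr : PySem.List.max? (T.filter (fun t => c t == c m')) ℓ = some r :=
            hfilt ▸ hr
          have hrmem : r ∈ T.filter (fun t => c t == c m') := PySem.List.max?_mem hfr
          have hrc : c r = c m' := by
            have := List.of_mem_filter hrmem; simpa using this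
          by_cases hlt : c m' < c x
          · -- new element strictly beats the old maximum count
            rw [if_pos hlt, Option.some.injEq] at hm
            replace hm : m = x := hm.symm
            subst hm
            have hnil : T.filter (fun t => c t == c m) = [] := by
              rw [List.filter_eq_nil_iff]
              intro a ha
              have := hmax' a ha
              simp only [beq_iff_eq]
              intro h; omega
            have hx : (List.filter (fun t => c t == c m) [m]) = [m] := by simp
            rw [hnil, hx, List.nil_append, hr]
            have h1 : decide (c r < c m) = true := by simp [hrc]; omega
            simp [h1, PySem.List.max?]
          · rw [if_neg hlt, Option.some.injEq] at hm
            replace hm : m = m' := hm.symm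
            subst hm
            by_cases heq : c x = c m
            · -- tie on count: both sides compare lengths
              have hx : (List.filter (fun t => c t == c m) [x]) = [x] := by simp [heq]
              rw [hx, hr, max?_append_singleton, hfr]
              have h1 : decide (c r < c x) = false := by simp [hrc, heq]
              have h2 : decide (c x < c r) = false := by simp [hrc, heq]
              simp only [h1, h2, Bool.false_or, Bool.not_false, Bool.true_and]
              by_cases hl : ℓ r < ℓ x <;> simp [hl]
            · -- new element has strictly smaller count: ignored on both sides
              have hcx : c x < c m := lt_of_le_of_ne (not_lt.mp hlt) heq
              have hx : (List.filter (fun t => c t == c m) [x]) = [] := by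
                simp only [List.filter_cons, List.filter_nil, beq_iff_eq]
                rw [if_neg (by simpa using heq)]
              rw [hx, List.append_nil, hr, hfr]
              have h1 : decide (c r < c x) = false := by simp [hrc]; omega
              have h2 : decide (c x < c r) = true := by simp [hrc]; omega
              simp [h1, h2]

-- a length-≤-1 list containing m is [m]
theorem eq_singleton_of_mem_of_length_le_one {α : Type} {l : List α} {m : α}
    (hm : m ∈ l) (hl : l.length ≤ 1) : l = [m] := by
  cases l with
  | nil => cases hm
  | cons a t =>
      cases t with
      | nil => simp at hm; simp [hm]
      | cons b u => simp at hl

-- A equals the first (count,len)-lexicographic maximum over the distinct variants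
theorem A_eq_target (vs : List String) (hnil : vs ≠ []) :
    find_canonical_form vs
      = (PySem.List.max2? (PySem.Set.ofList vs)
          (fun t => ((vs.count t : Int))) (fun t => PySem.Str.len t)).getD "" := by
  unfold find_canonical_form
  rw [if_neg hnil]
  have hitems := PySem.Dict.items_counter vs
  have hSne : (PySem.Set.ofList vs : List String) ≠ [] := by
    obtain ⟨a, ha⟩ := List.exists_mem_of_ne_nil vs hnil
    intro h
    have : a ∈ (PySem.Set.ofList vs : List String) := (PySem.Set.mem_ofList vs a).mpr ha
    rw [h] at this; cases this
  obtain ⟨m, hm⟩ : ∃ m, PySem.List.max? (PySem.Set.ofList vs)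
      (fun k => ((vs.count k : Int))) = some m := by
    rcases h : PySem.List.max? (PySem.Set.ofList vs) (fun k => ((vs.count k : Int))) with _ | m
    · exact absurd ((PySem.List.max?_eq_none_iff _ _).mp h) hSne
    · exact ⟨m, rfl⟩
  have hmc : ((PySem.List.max? (PySem.Dict.counter vs).items (fun p => p.2)).map Prod.fst).getD ""
      = m := by
    rw [hitems, max?_map, hm]; rfl
  have hgetD : (PySem.Dict.counter vs).getD m 0 = ((vs.count m : Int)) :=
    PySem.Dict.getD_counter vs m
  have hcand : ((PySem.Dict.counter vs).items.filter
        (fun p => p.2 == ((vs.count m : Int)))).map Prod.fst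
      = (PySem.Set.ofList vs : List String).filter
          (fun t => ((vs.count t : Int)) == ((vs.count m : Int))) := by
    rw [hitems, List.filter_map, List.map_map]
    simp [Function.comp_def]
  have hB : (PySem.List.max2? (PySem.Set.ofList vs)
        (fun t => ((vs.count t : Int))) (fun t => PySem.Str.len t)).getD ""
      = (PySem.List.max? ((PySem.Set.ofList vs : List String).filter
          (fun t => ((vs.count t : Int)) == ((vs.count m : Int)))) (fun t => PySem.Str.len t)).getD "" := by
    rw [max2?_eq_max?_filter _ (fun t => PySem.Str.len t) _ m hm]
  have hmmem : m ∈ (PySem.Set.ofList vs : List String).filter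
      (fun t => ((vs.count t : Int)) == ((vs.count m : Int))) :=
    List.mem_filter.mpr ⟨PySem.List.max?_mem hm, by simp⟩
  rw [hmc, hgetD, hcand, hB]
  by_cases hone : PySem.List.len vs = 1
  · -- A's len == 1 shortcut: vs = [a]
    rw [if_pos hone]
    rw [PySem.List.len_eq] at hone
    obtain ⟨a, ha⟩ := List.length_eq_one_iff.mp (by exact_mod_cast hone)
    subst ha
    have hSa : (PySem.Set.ofList [a] : List String) = [a] := rfl
    have hma : m = a := by
      have := PySem.List.max?_mem hm
      rw [hSa] at this; simpa using this
    subst hma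
    rw [hSa]
    simp [PySem.List.pyGet?, PySem.List.pyIdx?, PySem.List.max?]
  · rw [if_neg hone]
    by_cases hlen : 1 < ((PySem.Set.ofList vs : List String).filter
        (fun t => ((vs.count t : Int)) == ((vs.count m : Int)))).length
    · rw [if_pos hlen]
    · rw [if_neg hlen]
      rw [eq_singleton_of_mem_of_length_le_one hmmem (not_lt.mp hlen)]
      simp [PySem.List.max?]

-- the Bool step of max2? on a some-accumulator, as a plain function
def pvStep {α : Type} (k1 k2 : α → Int) (b x : α) : α :=
  if (decide (k1 b < k1 x) || !decide (k1 x < k1 b) && decide (k2 b < k2 x)) = true then x else b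

-- max2?'s foldl, once seeded with some m, is the seeded running maximum
theorem max2?_foldl_some {α : Type} (k1 k2 : α → Int) :
    ∀ (t : List α) (m : α),
    t.foldl (fun acc x => match acc with
        | none => some x
        | some b => if (decide (k1 b < k1 x) || !decide (k1 x < k1 b) && decide (k2 b < k2 x)) = true
                    then some x else some b) (some m)
      = some (t.foldl (pvStep k1 k2) m) := by
  intro t
  induction t with
  | nil => intro m; rfl
  | cons x xs ih =>
      intro m
      simp only [List.foldl_cons, pvStep]
      by_cases h : (decide (k1 m < k1 x) || !decide (k1 x < k1 m) && decide (k2 m < k2 x)) = true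
      · simp only [h, if_pos]; exact ih x
      · simp only [if_neg h]; exact ih m

-- max2? of a cons is the running maximum started at the head
theorem max2?_cons {α : Type} (k1 k2 : α → Int) (h : α) (t : List α) :
    PySem.List.max2? (h :: t) k1 k2 = some (t.foldl (pvStep k1 k2) h) := by
  simp only [PySem.List.max2?, List.foldl_cons]
  exact max2?_foldl_some k1 k2 t h

-- the element max2? picks (count,len)-dominates every member
theorem max2?_isMax_int {α : Type} (k1 k2 : α → Int) :
    ∀ (L : List α) (m : α), PySem.List.max2? L k1 k2 = some m →
      ∀ y ∈ L, k1 y < k1 m ∨ (k1 y = k1 m ∧ k2 y ≤ k2 m) := by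
  intro L
  induction L using List.reverseRecOn with
  | nil => intro m hm; simp [PySem.List.max2?] at hm
  | append_singleton T x ih =>
      intro m hm y hy
      rw [max2?_append_singleton] at hm
      cases hT : PySem.List.max2? T k1 k2 with
      | none =>
          have hTnil : T = [] := by
            cases T with
            | nil => rfl
            | cons a t => rw [max2?_cons] at hT; cases hT
          subst hTnil
          rw [hT, Option.some.injEq] at hm
          subst hm
          simp at hy
          subst hy
          right; omega
      | some m' =>
          rw [hT] at hm
          simp only at hm
          by_cases hc : (decide (k1 m' < k1 x) || !decide (k1 x < k1 m') && decide (k2 m' < k2 x)) = true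
          · rw [if_pos hc, Option.some.injEq] at hm
            subst hm
            have hdom : k1 m' < k1 x ∨ (k1 m' = k1 x ∧ k2 m' ≤ k2 x) := by
              simp only [Bool.or_eq_true, Bool.and_eq_true, Bool.not_eq_true',
                decide_eq_true_eq, decide_eq_false_iff_not] at hc
              rcases hc with h | ⟨h1, h2⟩
              · left; exact h
              · by_cases hq : k1 m' < k1 x
                · left; exact hq
                · right; constructor <;> omega
            rcases List.mem_append.mp hy with hy | hy
            · rcases ih m' hT y hy with h | ⟨h1, h2⟩ <;> rcases hdom with h' | ⟨h1', h2'⟩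
              · left; omega
              · left; omega
              · left; omega
              · right; constructor <;> omega
            · simp at hy; subst hy; right; omega
          · rw [if_neg hc, Option.some.injEq] at hm
            subst hm
            rcases List.mem_append.mp hy with hy | hy
            · exact ih m' hT y hy
            · simp at hy; subst hy
              simp only [Bool.or_eq_true, Bool.and_eq_true, Bool.not_eq_true',
                decide_eq_true_eq, decide_eq_false_iff_not, not_or, not_and] at hc
              obtain ⟨h1, h2⟩ := hc
              by_cases hlt : k1 y < k1 m'
              · left; exact hlt
              · right
                have he : k1 y = k1 m' := by omega
                refine ⟨he, ?_⟩
                have := h2 (by omega)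
                omega

-- B-SIDE CORE: max2? ignores duplicates — it agrees on the list and its first-occurrence dedup
theorem max2?_ofList {α : Type} [BEq α] [LawfulBEq α] (k1 k2 : α → Int) (L : List α) :
    PySem.List.max2? (PySem.Set.ofList L) k1 k2 = PySem.List.max2? L k1 k2 := by
  induction L using List.reverseRecOn with
  | nil => rfl
  | append_singleton T x ih =>
      have hadd : (PySem.Set.ofList (T ++ [x]) : List α)
          = PySem.Set.add (PySem.Set.ofList T) x := by
        rw [PySem.Set.ofList_eq_foldl, List.foldl_append, List.foldl_cons, List.foldl_nil,
          ← PySem.Set.ofList_eq_foldl]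
      by_cases hmem : x ∈ (PySem.Set.ofList T : List α)
      · -- duplicate: the running maximum already dominates x, the step is a no-op
        have hxT : x ∈ T := (PySem.Set.mem_ofList T x).mp hmem
        have hAdd : (PySem.Set.add (PySem.Set.ofList T) x : List α) = PySem.Set.ofList T := by
          simp [PySem.Set.add, PySem.Set.mem_ofList, hxT]
        rw [hadd, hAdd, ih, max2?_append_singleton]
        have hTne : T ≠ [] := by
          intro h; subst h; cases hxT
        obtain ⟨h, t, rfl⟩ := List.exists_cons_of_ne_nil hTne
        rw [max2?_cons]
        have hxmem : x ∈ (h :: t) := hxT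
        have hdom := max2?_isMax_int k1 k2 (h :: t) _ (max2?_cons k1 k2 h t) x hxmem
        have hcond : (decide (k1 (t.foldl (pvStep k1 k2) h) < k1 x)
            || !decide (k1 x < k1 (t.foldl (pvStep k1 k2) h))
               && decide (k2 (t.foldl (pvStep k1 k2) h) < k2 x)) = false := by
          rw [Bool.eq_false_iff]
          intro hcc
          simp only [Bool.or_eq_true, Bool.and_eq_true, Bool.not_eq_true',
            decide_eq_true_eq, decide_eq_false_iff_not] at hcc
          rcases hdom with h' | ⟨h1, h2⟩ <;> rcases hcc with hc1 | ⟨hc1, hc2⟩ <;> omega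
        simp [hcond]
      · -- new element: both sides take the same snoc step
        have hxT : x ∉ T := fun hx => hmem ((PySem.Set.mem_ofList T x).mpr hx)
        have hAdd : (PySem.Set.add (PySem.Set.ofList T) x : List α)
            = (PySem.Set.ofList T : List α) ++ [x] := by
          simp [PySem.Set.add, PySem.Set.mem_ofList, hxT]
        rw [hadd, hAdd, max2?_append_singleton, max2?_append_singleton, ih]

-- B's paired fold carries (best, its count): project it to a plain running maximum
theorem pair_foldl (c ℓ : String → Int) :
    ∀ (L : List String) (b : String),
    L.foldl (fun (p : String × Int) x =>
        if c x > p.2 ∨ (c x = p.2 ∧ ℓ x > ℓ p.1) then (x, c x) else p) (b, c b)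
      = (L.foldl (fun b x => if c x > c b ∨ (c x = c b ∧ ℓ x > ℓ b) then x else b) b,
         c (L.foldl (fun b x => if c x > c b ∨ (c x = c b ∧ ℓ x > ℓ b) then x else b) b)) := by
  intro L
  induction L with
  | nil => intro b; rfl
  | cons x xs ih =>
      intro b
      simp only [List.foldl_cons]
      by_cases h : c x > c b ∨ (c x = c b ∧ ℓ x > ℓ b)
      · rw [if_pos h, if_pos h]; exact ih x
      · rw [if_neg h, if_neg h]; exact ih b

-- B's strict-improvement test is max2?'s step condition
theorem g_eq_pvStep (c ℓ : String → Int) :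
    ∀ (L : List String) (b : String),
    L.foldl (fun b x => if c x > c b ∨ (c x = c b ∧ ℓ x > ℓ b) then x else b) b
      = L.foldl (pvStep c ℓ) b := by
  intro L
  induction L with
  | nil => intro b; rfl
  | cons x xs ih =>
      intro b
      simp only [List.foldl_cons]
      have hstep : (if c x > c b ∨ (c x = c b ∧ ℓ x > ℓ b) then x else b) = pvStep c ℓ b x := by
        unfold pvStep
        by_cases h : c x > c b ∨ (c x = c b ∧ ℓ x > ℓ b)
        · rw [if_pos h, if_pos]
          simp only [Bool.or_eq_true, Bool.and_eq_true, Bool.not_eq_true',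
            decide_eq_true_eq, decide_eq_false_iff_not]
          rcases h with h | ⟨h1, h2⟩
          · left; omega
          · right; constructor <;> omega
        · rw [if_neg h, if_neg]
          simp only [Bool.or_eq_true, Bool.and_eq_true, Bool.not_eq_true',
            decide_eq_true_eq, decide_eq_false_iff_not]
          have hgt : ¬ c x > c b := fun hg => h (Or.inl hg)
          have hln : c x = c b → ¬ ℓ x > ℓ b := fun he hl => h (Or.inr ⟨he, hl⟩)
          rintro (h' | ⟨h1, h2⟩)
          · omega
          · by_cases hc : c x < c b
            · omega
            · have := hln (by omega); omega
      rw [hstep]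
      exact ih (pvStep c ℓ b x)

-- B equals the same first (count,len)-lexicographic maximum
theorem B_eq_target (vs : List String) (hnil : vs ≠ []) :
    find_canonical_form_alt vs
      = (PySem.List.max2? (PySem.Set.ofList vs)
          (fun t => ((vs.count t : Int))) (fun t => PySem.Str.len t)).getD "" := by
  obtain ⟨h, t, rfl⟩ := List.exists_cons_of_ne_nil hnil
  unfold find_canonical_form_alt
  rw [if_neg hnil]
  have hget : (PySem.List.pyGet? (h :: t) 0).getD "" = h := by
    simp [PySem.List.pyGet?, PySem.List.pyIdx?]
  rw [hget]
  have hc : ∀ x, (PySem.List.count (h :: t) x : Int) = (((h :: t).count x : Int)) := by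
    intro x; rfl
  simp only [hc]
  rw [max2?_ofList, max2?_cons]
  simp only [Option.getD_some]
  rw [pair_foldl (fun x => (((h :: t).count x : Int))) (fun x => PySem.Str.len x)]
  simp only [List.foldl_cons]
  simp only [ite_self]
  exact g_eq_pvStep _ _ t h

-- ===== VERDICT (by name: the statement is the Claim_ definition above) =====
theorem find_canonical_form_spec : Claim_equal_find_canonical_form := by
  intro vs _
  unfold Spec_find_canonical_form
  by_cases hnil : vs = []
  · subst hnil; rfl
  · rw [A_eq_target vs hnil, B_eq_target vs hnil]
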